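-- pv_equiv track=rewrite | github.com/lzq114514/Pangenome-Graph-Annotation-PGA-pipeline | 8ncbi.py | find_other_boundary
-- ===== SOURCE A (Python) =====
-- def find_other_boundary(lines):
--     # first comment line with text starting 'other' (case-ins), then first data line with 3rd col == 'other'
--     for i, ln in enumerate(lines):
--         if ln.startswith("#"):
--             txt = ln.lstrip("#").strip().lower()
--             if txt.startswith("other"):
--                 return i
--     for i, ln in enumerate(lines):
--         if ln.startswith("#"):
--             continue
--         cols = ln.rstrip("\n").split("\t")
--         if len(cols) >= 3 and cols[2].strip().lower() == "other":
--             return i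
--     return None
-- ===== SOURCE B (Python) =====
-- def find_other_boundary(lines):
--     # Single pass: a comment 'other' line returns immediately; the first matching
--     # data line is only remembered and returned if no comment match exists.
--     data_idx = None
--     for i, ln in enumerate(lines):
--         if ln.startswith("#"):
--             if ln.lstrip("#").strip().lower().startswith("other"):
--                 return i
--         elif data_idx is None:
--             cols = ln.rstrip("\n").split("\t")
--             if len(cols) >= 3 and cols[2].strip().lower() == "other":
--                 data_idx = i
--     return data_idx
-- ===== Notes on version B (the rewrite author's own statement) =====
-- stated objective: simpler
-- what changed: Replaced A's two sequential full scans (comments first, then data lines) by one single pass that returns immediately on a comment match and remembers the first matching data line in a pending variable.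
import Mathlib
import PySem

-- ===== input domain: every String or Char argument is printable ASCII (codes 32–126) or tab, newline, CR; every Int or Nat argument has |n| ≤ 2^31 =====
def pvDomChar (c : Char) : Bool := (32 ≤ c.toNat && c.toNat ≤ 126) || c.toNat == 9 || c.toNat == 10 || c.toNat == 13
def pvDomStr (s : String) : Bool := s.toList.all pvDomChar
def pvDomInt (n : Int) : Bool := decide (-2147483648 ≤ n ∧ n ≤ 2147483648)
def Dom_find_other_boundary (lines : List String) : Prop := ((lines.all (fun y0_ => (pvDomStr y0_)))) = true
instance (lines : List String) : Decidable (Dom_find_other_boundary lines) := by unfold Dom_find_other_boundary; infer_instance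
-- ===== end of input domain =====

-- B merges A's two scans into one pass holding a pending data-line index (objective: simpler, one traversal).

-- shared string tests (hand-ported lstrip("#")/rstrip("\n"): dropWhile of exactly that char from the
-- relevant end, exact for single-char strip sets)
def pvLstripHash (s : List Char) : List Char := s.dropWhile (· == '#')
def pvRstripNL (s : List Char) : List Char := (s.reverse.dropWhile (· == '\n')).reverse

-- 'ln.lstrip("#").strip().lower().startswith("other")' for a comment line
def pvCommentOther (ln : String) : Bool :=
  PySem.Chars.startswith (PySem.Chars.lower (PySem.Chars.strip (pvLstripHash ln.toList))) "other".toList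

-- 'cols = ln.rstrip("\n").split("\t"); len(cols) >= 3 and cols[2].strip().lower() == "other"'
def pvDataOther (ln : String) : Bool :=
  let cols := PySem.Chars.splitOn (pvRstripNL ln.toList) "\t".toList
  3 ≤ cols.length && PySem.Chars.lower (PySem.Chars.strip (PySem.List.pyGetD cols 2 [])) == "other".toList

-- ===== PORT A =====
-- first loop: first comment line whose text starts with 'other'
def pvScanComment : List (Int × String) → Option Int
  | [] => none
  | (i, ln) :: rest =>
    if PySem.Str.startswith ln "#" then
      if pvCommentOther ln then some i else pvScanComment rest
    else pvScanComment rest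

-- second loop: first non-comment line whose third column is 'other'
def pvScanData : List (Int × String) → Option Int
  | [] => none
  | (i, ln) :: rest =>
    if PySem.Str.startswith ln "#" then pvScanData rest
    else if pvDataOther ln then some i else pvScanData rest

def find_other_boundary (lines : List String) : Option Int :=
  match pvScanComment (PySem.List.enumerate lines 0) with
  | some i => some i
  | none => pvScanData (PySem.List.enumerate lines 0)

-- ===== PORT B =====
-- single pass: return on a comment match, remember the first data match in data_idx
def pvScanB : List String → Int → Option Int → Option Int
  | [], _, dataIdx => dataIdx
  | ln :: rest, i, dataIdx =>
    if PySem.Str.startswith ln "#" then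
      if pvCommentOther ln then some i else pvScanB rest (i + 1) dataIdx
    else if dataIdx = none then
      if pvDataOther ln then pvScanB rest (i + 1) (some i) else pvScanB rest (i + 1) dataIdx
    else pvScanB rest (i + 1) dataIdx

def find_other_boundary_alt (lines : List String) : Option Int :=
  pvScanB lines 0 none

-- ===== PRECONDITION & SPEC =====
def Spec_find_other_boundary (lines : List String) (out : Option Int) : Prop := out = find_other_boundary_alt lines
instance (lines : List String) (out : Option Int) : Decidable (Spec_find_other_boundary lines out) := by unfold Spec_find_other_boundary; infer_instance

-- ===== CLAIM (what is proved, stated in full; the proofs are below) =====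
def Claim_equal_find_other_boundary : Prop := ∀ (lines : List String), Dom_find_other_boundary lines → Spec_find_other_boundary lines (find_other_boundary lines)

-- ===== LEMMAS AND PROOFS =====

-- B's single pass equals: comment scan first, else the pending index, else the data scan.
theorem pvScanB_eq (l : List String) (s : Int) (acc : Option Int) :
    pvScanB l s acc =
      match pvScanComment (PySem.List.enumerate l s) with
      | some i => some i
      | none =>
        match acc with
        | some j => some j
        | none => pvScanData (PySem.List.enumerate l s) := by
  induction l generalizing s acc with
  | nil => cases acc <;> simp [pvScanB, pvScanComment, pvScanData, PySem.List.enumerate_nil]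
  | cons ln rest ih =>
    simp only [pvScanB, PySem.List.enumerate_cons, pvScanComment, pvScanData]
    by_cases hc : PySem.Str.startswith ln "#"
    · simp only [hc, if_true]
      by_cases ho : pvCommentOther ln
      · simp [ho]
      · simp only [ho, Bool.false_eq_true, if_false, ih]
    · simp only [hc, Bool.false_eq_true, if_false]
      cases acc with
      | some j => simp [ih]
      | none =>
        by_cases hd : pvDataOther ln
        · simp [hd, ih]
        · simp [hd, ih]

-- ===== VERDICT (by name: the statement is the Claim_ definition above) =====
theorem find_other_boundary_spec : Claim_equal_find_other_boundary := by
  intro lines _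
  unfold Spec_find_other_boundary find_other_boundary find_other_boundary_alt
  rw [pvScanB_eq]
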